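-- pv_equiv track=rewrite | github.com/SIDED00R/Code_training | 프로그래머스/lv0/120904. 숫자 찾기/숫자 찾기.py | solution
-- ===== SOURCE A (Python) =====
-- def solution(num, k):
--     count = 0
--     find = 0
--     while num != 0:
--         count += 1
--         if k == num % 10:
--             find = count
--         num //= 10
--     if find == 0:
--         return -1
--
--     return count - find + 1
-- ===== SOURCE B (Python) =====
-- def solution(num, k):
--     digits = []
--     while num != 0:
--         digits.append(num % 10)
--         num //= 10
--     digits.reverse()
--     if k in digits:
--         return digits.index(k) + 1
--     return -1
-- ===== Notes on version B (the rewrite author's own statement) =====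
-- stated objective: idiomatic
-- what changed: A tracks count/find registers inside one digit-extraction loop; B materialises the digit list, reverses it, and answers with a membership test plus first-index lookup, so no positional bookkeeping happens during extraction.
import Mathlib
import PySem

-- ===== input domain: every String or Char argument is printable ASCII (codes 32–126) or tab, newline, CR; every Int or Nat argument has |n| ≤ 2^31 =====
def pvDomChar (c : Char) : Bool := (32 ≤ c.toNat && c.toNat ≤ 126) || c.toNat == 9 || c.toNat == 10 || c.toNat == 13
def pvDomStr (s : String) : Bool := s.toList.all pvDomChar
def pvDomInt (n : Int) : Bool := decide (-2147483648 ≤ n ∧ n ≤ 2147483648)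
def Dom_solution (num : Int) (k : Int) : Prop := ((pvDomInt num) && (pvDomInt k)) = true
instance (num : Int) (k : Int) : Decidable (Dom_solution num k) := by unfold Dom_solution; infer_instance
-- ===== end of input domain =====

-- B replaces A's single counting scan (count/find registers) by: build the digit list, reverse it,
-- then a membership test + first-index lookup; objective: simpler/idiomatic, not faster.

-- ===== PORT A =====
-- A's while loop; the guard 0 < num coincides with Python's num != 0 on Pre_ (0 ≤ num) and only makes the recursion total
def aLoop (k num count find : Int) : Int × Int :=
  if h : 0 < num then
    aLoop k (PySem.Int.floordiv num 10) (count + 1)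
      (if k = PySem.Int.mod num 10 then count + 1 else find)
  else (count, find)
termination_by num.toNat
decreasing_by
  rw [PySem.Int.floordiv_eq_ediv_of_pos (by norm_num : (0:Int) < 10)]
  omega

def solution (num : Int) (k : Int) : Int :=
  let cf := aLoop k num 0 0
  if cf.2 = 0 then -1 else cf.1 - cf.2 + 1

-- ===== PORT B =====
-- B's first while loop: append num % 10, num //= 10 (same totalising guard as above)
def bLoop (num : Int) (acc : List Int) : List Int :=
  if h : 0 < num then
    bLoop (PySem.Int.floordiv num 10) (acc ++ [PySem.Int.mod num 10])
  else acc
termination_by num.toNat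
decreasing_by
  rw [PySem.Int.floordiv_eq_ediv_of_pos (by norm_num : (0:Int) < 10)]
  omega

def solution_alt (num : Int) (k : Int) : Int :=
  let digits := (bLoop num []).reverse
  if digits.contains k then
    match PySem.List.index? digits k with
    | some j => (j : Int) + 1
    | none => -1   -- unreachable: k ∈ digits
  else -1

-- ===== PRECONDITION & SPEC =====
-- Pre_ excludes num < 0, on which A's while loop never terminates (num //= 10 stalls at -1), so A returns no value there.
def Pre_solution (num : Int) (k : Int) : Prop := 0 ≤ num
instance (num : Int) (k : Int) : Decidable (Pre_solution num k) := by unfold Pre_solution; infer_instance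
def pvWitness_solution : Int × Int := (120904, 0)

def Spec_solution (num : Int) (k : Int) (out : Int) : Prop := out = solution_alt num k
instance (num : Int) (k : Int) (out : Int) : Decidable (Spec_solution num k out) := by unfold Spec_solution; infer_instance

-- ===== CLAIM (what is proved, stated in full; the proofs are below) =====
def Claim_equal_solution : Prop := ∀ (num : Int) (k : Int), Dom_solution num k → Pre_solution num k → Spec_solution num k (solution num k)

-- ===== LEMMAS AND PROOFS =====

/-- The digit list of `num`, least-significant first (cons form of `bLoop`). -/
def pvDigits (num : Int) : List Int :=
  if h : 0 < num then PySem.Int.mod num 10 :: pvDigits (PySem.Int.floordiv num 10) else []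
termination_by num.toNat
decreasing_by
  rw [PySem.Int.floordiv_eq_ediv_of_pos (by norm_num : (0:Int) < 10)]
  omega

lemma bLoop_eq (num : Int) (acc : List Int) : bLoop num acc = acc ++ pvDigits num := by
  fun_induction bLoop num acc with
  | case1 num acc h ih => rw [pvDigits, dif_pos h, ih]; simp
  | case2 num acc h => rw [pvDigits, dif_neg h]; simp

def pvStep (k : Int) (p : Int × Int) (d : Int) : Int × Int :=
  (p.1 + 1, if k = d then p.1 + 1 else p.2)

lemma aLoop_eq (k num count find : Int) :
    aLoop k num count find = (pvDigits num).foldl (pvStep k) (count, find) := by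
  fun_induction aLoop k num count find with
  | case1 num count find h ih =>
      rw [pvDigits, dif_pos h]
      simp only [List.foldl_cons, pvStep]
      exact ih
  | case2 num count find h => rw [pvDigits, dif_neg h]; simp

/-- Characterisation of A's fold over `rs.reverse` in terms of the MSB-first list `rs`. -/
lemma key (k : Int) (rs : List Int) :
    ((rs.reverse.foldl (pvStep k) ((0:Int), (0:Int))).1 = rs.length) ∧
    (k ∉ rs → (rs.reverse.foldl (pvStep k) ((0:Int), (0:Int))).2 = 0) ∧
    (∀ j, PySem.List.index? rs k = some j →
      (rs.reverse.foldl (pvStep k) ((0:Int), (0:Int))).2 = (rs.length : Int) - j) := by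
  induction rs with
  | nil => simp [PySem.List.index?]
  | cons x t ih =>
      obtain ⟨ih1, ih2, ih3⟩ := ih
      have hrev : (x :: t).reverse = t.reverse ++ [x] := by simp
      rw [hrev, List.foldl_append]
      simp only [List.foldl_cons, List.foldl_nil, pvStep]
      refine ⟨?_, ?_, ?_⟩
      · simp only [List.length_cons, ih1]; push_cast; ring
      · intro hnm
        have hx : k ≠ x := fun h => hnm (h ▸ List.mem_cons_self)
        have ht : k ∉ t := fun h => hnm (List.mem_cons_of_mem _ h)
        simp only [if_neg hx]
        exact ih2 ht
      · intro j hj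
        by_cases hx : x = k
        · subst hx
          rw [PySem.List.index?_cons_self] at hj
          cases hj
          simp only [if_pos rfl, ih1, List.length_cons]
          push_cast; ring
        · rw [PySem.List.index?_cons_of_ne _ hx] at hj
          obtain ⟨j', hj', rfl⟩ := Option.map_eq_some_iff.mp hj
          have hk : k ≠ x := fun h => hx h.symm
          rw [if_neg hk, ih3 j' hj', List.length_cons]
          push_cast; ring

lemma index?_lt_length {rs : List Int} {k : Int} {j : Nat}
    (h : PySem.List.index? rs k = some j) : j < rs.length := by
  obtain ⟨hk, _, _⟩ := PySem.List.getElem_of_index?_eq_some h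
  exact hk

-- ===== VERDICT (by name: the statement is the Claim_ definition above) =====
theorem solution_spec : Claim_equal_solution := by
  intro num k _ hpre
  unfold Spec_solution solution solution_alt
  rw [bLoop_eq]
  simp only [List.nil_append]
  have hrev : pvDigits num = (pvDigits num).reverse.reverse := (List.reverse_reverse _).symm
  rw [aLoop_eq, hrev]
  generalize (pvDigits num).reverse = rs
  rw [List.reverse_reverse]
  obtain ⟨h1, h2, h3⟩ := key k rs
  by_cases hmem : k ∈ rs
  · have hcont : rs.contains k = true := List.contains_iff_mem.mpr hmem
    obtain ⟨j, hj⟩ := Option.isSome_iff_exists.mp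
      ((PySem.List.index?_isSome_iff rs k).mpr hmem)
    have hjl : j < rs.length := index?_lt_length hj
    have hs := h3 j hj
    rw [if_pos hcont, hj]
    have hne : (rs.reverse.foldl (pvStep k) ((0:Int), (0:Int))).2 ≠ 0 := by
      rw [hs]; omega
    rw [if_neg hne, h1, hs]
    show (rs.length : Int) - ((rs.length : Int) - j) + 1 = (j : Int) + 1
    omega
  · have hcont : ¬ rs.contains k = true := fun h => hmem (List.contains_iff_mem.mp h)
    rw [if_pos (h2 hmem), if_neg hcont]
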